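-- pv_equiv track=rewrite | github.com/ricardoalt1515/h2o-allegiant-backend | app/visualization/modern_charts.py | _get_equipment_css_class
-- ===== SOURCE A (Python) =====
-- def _get_equipment_css_class(eq_type: str) -> str:
--     """Determina la clase CSS basada en el tipo de equipo"""
--     eq_type = eq_type.upper()
--
--     if any(word in eq_type for word in ['REJILLA', 'CRIBADO', 'DESARENADOR', 'DESENGRASADOR']):
--         return 'pretratamiento'
--     elif any(word in eq_type for word in ['REACTOR', 'BIOLOGICO', 'MBBR', 'LODOS', 'ACTIVADOS']):
--         return 'biologico'
--     elif any(word in eq_type for word in ['COAGULACION', 'FLOCULACION', 'SEDIMENTACION', 'DAF']):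
--         return 'fisicoquimico'
--     elif any(word in eq_type for word in ['FILTRO', 'FILTRACION', 'MEMBRANA', 'ULTRAFILTRO', 'NANOFILTRO']):
--         return 'filtracion'
--     elif any(word in eq_type for word in ['DESINFECCION', 'UV', 'CLORO', 'OZONO']):
--         return 'desinfeccion'
--     else:
--         return 'general'
-- ===== SOURCE B (Python) =====
-- # B: flat keyword -> (priority, css_class) index; answer = class of the minimum-priority
-- # matched keyword (min over matches), instead of an ordered per-category if/elif chain.
-- _KEYWORD_INDEX = {}
-- for _prio, (_css, _words) in enumerate([
--     ('pretratamiento', ['REJILLA', 'CRIBADO', 'DESARENADOR', 'DESENGRASADOR']),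
--     ('biologico', ['REACTOR', 'BIOLOGICO', 'MBBR', 'LODOS', 'ACTIVADOS']),
--     ('fisicoquimico', ['COAGULACION', 'FLOCULACION', 'SEDIMENTACION', 'DAF']),
--     ('filtracion', ['FILTRO', 'FILTRACION', 'MEMBRANA', 'ULTRAFILTRO', 'NANOFILTRO']),
--     ('desinfeccion', ['DESINFECCION', 'UV', 'CLORO', 'OZONO']),
-- ]):
--     for _w in _words:
--         _KEYWORD_INDEX[_w] = (_prio, _css)
--
-- def _get_equipment_css_class(eq_type: str) -> str:
--     t = eq_type.upper()
--     _, css = min((pc for w, pc in _KEYWORD_INDEX.items() if w in t),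
--                  default=(5, 'general'))
--     return css
-- ===== Notes on version B (the rewrite author's own statement) =====
-- stated objective: alternative
-- what changed: Replaces the five-branch if/elif category chain with a flat keyword->(priority, css_class) index built once; the answer is the class of the minimum-priority matched keyword via a single min over matches.
import Mathlib
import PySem

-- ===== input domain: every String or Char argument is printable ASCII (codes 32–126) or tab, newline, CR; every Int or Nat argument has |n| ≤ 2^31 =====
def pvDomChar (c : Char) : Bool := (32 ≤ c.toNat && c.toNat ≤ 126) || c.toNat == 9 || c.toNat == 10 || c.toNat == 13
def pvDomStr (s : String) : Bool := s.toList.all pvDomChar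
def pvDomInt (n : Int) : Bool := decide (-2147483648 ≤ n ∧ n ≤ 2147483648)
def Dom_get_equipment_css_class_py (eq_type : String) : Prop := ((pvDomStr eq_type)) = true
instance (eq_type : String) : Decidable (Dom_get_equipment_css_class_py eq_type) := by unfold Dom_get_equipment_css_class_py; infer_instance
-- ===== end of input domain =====

-- B replaces A's if/elif category chain with a flat keyword→(priority, class) index and a min over matched keywords (alternative).

-- ===== PORT A =====
def get_equipment_css_class_py (eq_type : String) : String :=
  let t := PySem.Str.upper eq_type
  if ["REJILLA", "CRIBADO", "DESARENADOR", "DESENGRASADOR"].any (fun w => PySem.Str.isIn w t) then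
    "pretratamiento"
  else if ["REACTOR", "BIOLOGICO", "MBBR", "LODOS", "ACTIVADOS"].any (fun w => PySem.Str.isIn w t) then
    "biologico"
  else if ["COAGULACION", "FLOCULACION", "SEDIMENTACION", "DAF"].any (fun w => PySem.Str.isIn w t) then
    "fisicoquimico"
  else if ["FILTRO", "FILTRACION", "MEMBRANA", "ULTRAFILTRO", "NANOFILTRO"].any (fun w => PySem.Str.isIn w t) then
    "filtracion"
  else if ["DESINFECCION", "UV", "CLORO", "OZONO"].any (fun w => PySem.Str.isIn w t) then
    "desinfeccion"
  else
    "general"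

-- ===== PORT B =====
-- the flat keyword index: each keyword mapped to its (priority, css_class)
def kwGroup (i : Nat) (css : String) (ws : List String) : List (String × Nat × String) :=
  ws.map (fun w => (w, i, css))

def kwIndex : List (String × Nat × String) :=
  kwGroup 0 "pretratamiento" ["REJILLA", "CRIBADO", "DESARENADOR", "DESENGRASADOR"] ++
  kwGroup 1 "biologico" ["REACTOR", "BIOLOGICO", "MBBR", "LODOS", "ACTIVADOS"] ++
  kwGroup 2 "fisicoquimico" ["COAGULACION", "FLOCULACION", "SEDIMENTACION", "DAF"] ++
  kwGroup 3 "filtracion" ["FILTRO", "FILTRACION", "MEMBRANA", "ULTRAFILTRO", "NANOFILTRO"] ++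
  kwGroup 4 "desinfeccion" ["DESINFECCION", "UV", "CLORO", "OZONO"]

-- Python's min over (prio, css) pairs: keep the first pair with strictly smaller priority
def minStep (acc : Nat × String) (e : String × Nat × String) : Nat × String :=
  if e.2.1 < acc.1 then e.2 else acc

def get_equipment_css_class_py_alt (eq_type : String) : String :=
  let t := PySem.Str.upper eq_type
  let best := (kwIndex.filter (fun e => PySem.Str.isIn e.1 t)).foldl minStep (5, "general")
  best.2

-- ===== PRECONDITION & SPEC =====
def Spec_get_equipment_css_class_py (eq_type : String) (out : String) : Prop := out = get_equipment_css_class_py_alt eq_type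
instance (eq_type : String) (out : String) : Decidable (Spec_get_equipment_css_class_py eq_type out) := by unfold Spec_get_equipment_css_class_py; infer_instance

-- ===== CLAIM =====
def Claim_equal_get_equipment_css_class_py : Prop := ∀ (eq_type : String), Dom_get_equipment_css_class_py eq_type → Spec_get_equipment_css_class_py eq_type (get_equipment_css_class_py eq_type)

-- ===== LEMMAS AND PROOFS =====
-- Folding over a group whose entries all carry the same (i, css): one min-update if any keyword matches.
theorem foldl_kwGroup (t : String) (ws : List String) (i : Nat) (css : String) (acc : Nat × String) :
    ((kwGroup i css ws).filter (fun e => PySem.Str.isIn e.1 t)).foldl minStep acc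
    = if ws.any (fun w => PySem.Str.isIn w t) then (if i < acc.1 then (i, css) else acc) else acc := by
  induction ws generalizing acc with
  | nil => simp [kwGroup]
  | cons w rest ih =>
    simp only [kwGroup, List.map_cons, List.any_cons]
    by_cases hw : PySem.Str.isIn w t
    · simp only [hw, List.filter_cons_of_pos, List.foldl_cons, Bool.true_or, if_true]
      rw [show ((rest.map fun w => (w, i, css)).filter (fun e => PySem.Str.isIn e.1 t)).foldl minStep (minStep acc (w, i, css)) = _ from ih _]
      unfold minStep
      split_ifs with h1 h2 h3 h4 h5 <;> simp_all <;> omega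
    · simp only [List.filter_cons, hw, Bool.false_eq_true, if_false, Bool.false_or]
      exact ih acc

theorem get_equipment_css_class_py_eq (eq_type : String) :
    get_equipment_css_class_py eq_type = get_equipment_css_class_py_alt eq_type := by
  unfold get_equipment_css_class_py get_equipment_css_class_py_alt kwIndex
  simp only [List.filter_append, List.foldl_append, foldl_kwGroup]
  by_cases h1 : (["REJILLA", "CRIBADO", "DESARENADOR", "DESENGRASADOR"].any (fun w => PySem.Str.isIn w (PySem.Str.upper eq_type))) <;>
  by_cases h2 : (["REACTOR", "BIOLOGICO", "MBBR", "LODOS", "ACTIVADOS"].any (fun w => PySem.Str.isIn w (PySem.Str.upper eq_type))) <;>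
  by_cases h3 : (["COAGULACION", "FLOCULACION", "SEDIMENTACION", "DAF"].any (fun w => PySem.Str.isIn w (PySem.Str.upper eq_type))) <;>
  by_cases h4 : (["FILTRO", "FILTRACION", "MEMBRANA", "ULTRAFILTRO", "NANOFILTRO"].any (fun w => PySem.Str.isIn w (PySem.Str.upper eq_type))) <;>
  by_cases h5 : (["DESINFECCION", "UV", "CLORO", "OZONO"].any (fun w => PySem.Str.isIn w (PySem.Str.upper eq_type))) <;>
  simp only [h1, h2, h3, h4, h5, eq_self_iff_true, if_true, if_false,
    Bool.false_eq_true, iff_false] <;> rfl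

-- ===== VERDICT =====
theorem get_equipment_css_class_py_spec : Claim_equal_get_equipment_css_class_py := by
  intro eq_type _
  unfold Spec_get_equipment_css_class_py
  exact get_equipment_css_class_py_eq eq_type
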